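-- pv_equiv track=rewrite | github.com/hal9000universe/gauss | src/data_engine/data_pipe.py | format_decoding
-- ===== SOURCE A (Python) =====
-- def format_decoding(decoding: str) -> str:
--     """Formats the decoding.
--
--     Args:
--         decoding (str): decoding
--
--     Returns:
--         str: formatted decoding"""
--     for i in range(0, 10):
--         decoding = decoding.replace(f"{i} ", f"{i}")
--     decoding = decoding.replace(". ", ".")
--     decoding = decoding.replace("( ", "(")
--     decoding = decoding.replace("- ", "-")
--     decoding = decoding.replace(", ", ",")
--     decoding = decoding.replace("/n ", " /n")
--     return decoding
-- ===== SOURCE B (Python) =====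
-- def format_decoding(decoding: str) -> str:
--     """Formats the decoding.
--
--     Args:
--         decoding (str): decoding
--
--     Returns:
--         str: formatted decoding"""
--     # Tokenise on single spaces, then rejoin: the separator after a chunk is
--     # dropped exactly when that chunk ends with a digit or one of . ( - ,
--     parts = decoding.split(' ')
--     pieces = [parts[0]]
--     for prev, part in zip(parts, parts[1:]):
--         if not (prev and prev[-1] in "0123456789.(-,"):
--             pieces.append(' ')
--         pieces.append(part)
--     return ''.join(pieces).replace('/n ', ' /n')
-- ===== Notes on version B (the rewrite author's own statement) =====
-- stated objective: alternative
-- what changed: Instead of fourteen sequential whole-string replace passes, B splits the string into tokens on single spaces and rejoins them, emitting the separating space back only when the preceding token does not end in a digit or one of . ( - , (the '/n ' move stays the final separate step); the string is traversed once as a token list rather than rescanned per pattern.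
import Mathlib
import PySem

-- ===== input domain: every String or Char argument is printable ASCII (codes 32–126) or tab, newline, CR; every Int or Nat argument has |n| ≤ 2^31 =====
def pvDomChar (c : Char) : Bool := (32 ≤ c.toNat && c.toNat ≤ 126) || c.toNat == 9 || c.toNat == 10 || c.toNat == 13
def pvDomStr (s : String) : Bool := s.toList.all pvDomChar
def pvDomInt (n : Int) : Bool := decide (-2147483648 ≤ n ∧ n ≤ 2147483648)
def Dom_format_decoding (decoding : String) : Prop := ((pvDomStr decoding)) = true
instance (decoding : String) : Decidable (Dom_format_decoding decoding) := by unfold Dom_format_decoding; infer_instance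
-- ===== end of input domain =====

-- B replaces A's fourteen sequential whole-string replace passes by a split on single
-- spaces and a rejoin that re-emits a separator only when the preceding token does not
-- end in a digit or . ( - ; an alternative one-traversal decomposition, same result.

-- ===== PORT A =====
-- A works on code points: each str.replace is PySem.Chars.replace on .toList (exact).
def format_decoding (decoding : String) : String :=
  -- for i in range(0, 10): decoding = decoding.replace(f"{i} ", f"{i}")
  let d := (PySem.List.pyRange 0 10 1).foldl
      (fun d i => PySem.Chars.replace d (PySem.Int.toChars i ++ [' ']) (PySem.Int.toChars i))
      decoding.toList
  let d := PySem.Chars.replace d ['.', ' '] ['.']   -- decoding.replace(". ", ".")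
  let d := PySem.Chars.replace d ['(', ' '] ['(']   -- decoding.replace("( ", "(")
  let d := PySem.Chars.replace d ['-', ' '] ['-']   -- decoding.replace("- ", "-")
  let d := PySem.Chars.replace d [',', ' '] [',']   -- decoding.replace(", ", ",")
  let d := PySem.Chars.replace d ['/', 'n', ' '] [' ', '/', 'n']   -- decoding.replace("/n ", " /n")
  String.ofList d

-- ===== PORT B =====
-- c in "0123456789.(-," (membership of a single character)
def pvTrig (c : Char) : Bool := ("0123456789.(-,".toList).contains c

-- prev and prev[-1] in "0123456789.(-,"
def pvEndsTrig (prev : List Char) : Bool :=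
  match prev.getLast? with
  | some c => pvTrig c
  | none => false

def format_decoding_alt (decoding : String) : String :=
  -- parts = decoding.split(' ')
  let parts := PySem.Chars.splitOn decoding.toList [' ']
  -- pieces = [parts[0]]  (split(' ') always returns at least one piece)
  let pieces := [parts.headD []]
  -- for prev, part in zip(parts, parts[1:]): if not (prev and prev[-1] in …): pieces.append(' '); pieces.append(part)
  let pieces := (parts.zip parts.tail).foldl
      (fun acc pp =>
        let acc := if !(pvEndsTrig pp.1) then acc ++ [[' ']] else acc
        acc ++ [pp.2])
      pieces
  -- ''.join(pieces).replace('/n ', ' /n')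
  PySem.Str.replace (String.ofList pieces.flatten) "/n " " /n"

-- ===== PRECONDITION & SPEC =====
def Spec_format_decoding (decoding : String) (out : String) : Prop := out = format_decoding_alt decoding
instance (decoding : String) (out : String) : Decidable (Spec_format_decoding decoding out) := by unfold Spec_format_decoding; infer_instance

-- ===== CLAIM (what is proved, stated in full; the proofs are below) =====
def Claim_equal_format_decoding : Prop := ∀ (decoding : String), Dom_format_decoding decoding → Spec_format_decoding decoding (format_decoding decoding)

-- ===== LEMMAS AND PROOFS =====

-- one pass of A's replace "t " -> "t", as structural recursion
def repl1 (t : Char) : List Char → List Char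
  | [] => []
  | [c] => [c]
  | c :: d :: r => if c == t && d == ' ' then c :: repl1 t r else c :: repl1 t (d :: r)

-- a single scan dropping one space after any trigger of p
def onePassP (p : Char → Bool) : List Char → List Char
  | [] => []
  | [c] => [c]
  | c :: d :: r => if p c && d == ' ' then c :: onePassP p r else c :: onePassP p (d :: r)

-- the same scan with a look-behind flag instead of a look-ahead pair
def scanF : Bool → List Char → List Char
  | _, [] => []
  | flag, c :: r => if flag && c == ' ' then scanF false r else c :: scanF (pvTrig c) r

-- reference split on single spaces (Python split(' ')), current piece carried in order
def splitH : List Char → List Char → List (List Char)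
  | cur, [] => [cur]
  | cur, c :: r => if c = ' ' then cur :: splitH [] r else splitH (cur ++ [c]) r

-- reference rejoin: B's loop body
def joinGo : List Char → List (List Char) → List Char
  | _, [] => []
  | prev, p :: ps => (if pvEndsTrig prev then p else ' ' :: p) ++ joinGo p ps

def jAll : List (List Char) → List Char
  | [] => []
  | p :: ps => p ++ joinGo p ps

lemma onePassP_space (p : Char → Bool) (hp : p ' ' = false) (r : List Char) :
    onePassP p (' ' :: r) = ' ' :: onePassP p r := by
  cases r with
  | nil => simp [onePassP]
  | cons d r => simp [onePassP, hp]

lemma onePassP_head? (p : Char → Bool) (x : Char) (l : List Char) :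
    (onePassP p (x :: l)).head? = some x := by
  cases l with
  | nil => simp [onePassP]
  | cons d r => simp only [onePassP]; split <;> simp

lemma repl1_cons_of (t c : Char) (L : List Char)
    (h : c ≠ t ∨ L.head? ≠ some ' ') : repl1 t (c :: L) = c :: repl1 t L := by
  cases L with
  | nil => simp [repl1]
  | cons d r =>
    simp only [repl1]
    rcases h with h | h
    · simp [h]
    · simp at h
      simp [h]

lemma onePassP_false (s : List Char) : onePassP (fun _ => false) s = s := by
  induction s using onePassP.induct (fun _ => false) with
  | case1 => rfl
  | case2 c => rfl
  | case3 c d r h ih => simp at h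
  | case4 c d r h ih => simp [onePassP, ih]

lemma onePassP_congr (p q : Char → Bool) (h : ∀ c, p c = q c) :
    ∀ s, onePassP p s = onePassP q s := by
  intro s
  induction s using onePassP.induct p with
  | case1 => rfl
  | case2 c => rfl
  | case3 c d r hg ih =>
    have hq : (q c && (d == ' ')) = true := by rw [← h c]; simpa using hg
    simp [onePassP, hg, hq, ih]
  | case4 c d r hg ih =>
    have hq : (q c && (d == ' ')) = false := by rw [← h c]; simpa using hg
    simp only [onePassP]
    rw [if_neg, if_neg, ih] <;> simp_all

-- applying one replace pass "t " -> "t" after a scan over triggers p (with t not in p)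
-- extends the scan's trigger set by t: the heart of the A-side equivalence
lemma onePassP_step_fuel (p : Char → Bool) (t : Char)
    (hpt : p t = false) (hps : p ' ' = false) :
    ∀ (n : Nat) (s : List Char), s.length ≤ n →
      repl1 t (onePassP p s) = onePassP (fun c => p c || (c == t)) s := by
  intro n
  induction n with
  | zero =>
    intro s hs
    have : s = [] := List.eq_nil_of_length_eq_zero (Nat.le_zero.mp hs)
    subst this; rfl
  | succ n ih =>
    intro s hs
    cases s with
    | nil => rfl
    | cons c s' =>
      cases s' with
      | nil => rfl
      | cons d r =>
        simp only [List.length_cons] at hs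
        by_cases h1 : p c = true ∧ d = ' '
        · obtain ⟨hpc, hd⟩ := h1; subst hd
          have hct : c ≠ t := by intro h; subst h; simp [hpt] at hpc
          calc repl1 t (onePassP p (c :: ' ' :: r))
              = repl1 t (c :: onePassP p r) := by simp [onePassP, hpc]
            _ = c :: repl1 t (onePassP p r) := repl1_cons_of t c _ (Or.inl hct)
            _ = c :: onePassP (fun c => p c || (c == t)) r := by rw [ih r (by omega)]
            _ = onePassP (fun c => p c || (c == t)) (c :: ' ' :: r) := by
                simp [onePassP, hpc]
        · by_cases h2 : c = t ∧ d = ' '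
          · obtain ⟨hc, hd⟩ := h2; subst hd
            have hpc : p c = false := by rw [hc]; exact hpt
            calc repl1 t (onePassP p (c :: ' ' :: r))
                = repl1 t (c :: ' ' :: onePassP p r) := by
                  rw [show onePassP p (c :: ' ' :: r) = c :: onePassP p (' ' :: r) by
                        simp [onePassP, hpc],
                      onePassP_space p hps]
              _ = c :: repl1 t (onePassP p r) := by simp [repl1, hc]
              _ = c :: onePassP (fun c => p c || (c == t)) r := by rw [ih r (by omega)]
              _ = onePassP (fun c => p c || (c == t)) (c :: ' ' :: r) := by
                  simp [onePassP, hc]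
          · have hg : (p c && (d == ' ')) = false := by
              rcases not_and_or.mp h1 with h | h
              · simp [Bool.eq_false_iff.mpr h]
              · simp [h]
            have hg' : ((p c || (c == t)) && (d == ' ')) = false := by
              rcases not_and_or.mp h1 with h | h
              · rcases not_and_or.mp h2 with h' | h'
                · simp [Bool.eq_false_iff.mpr h, h']
                · simp [h']
              · simp [h]
            have hhead : c ≠ t ∨ (onePassP p (d :: r)).head? ≠ some ' ' := by
              rcases not_and_or.mp h2 with h' | h'
              · exact Or.inl h'
              · right; rw [onePassP_head?]; simp [h']
            calc repl1 t (onePassP p (c :: d :: r))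
                = repl1 t (c :: onePassP p (d :: r)) := by
                  simp only [onePassP]; rw [if_neg (by simp [hg])]
              _ = c :: repl1 t (onePassP p (d :: r)) := repl1_cons_of t c _ hhead
              _ = c :: onePassP (fun c => p c || (c == t)) (d :: r) := by
                  rw [ih (d :: r) (by simp; omega)]
              _ = onePassP (fun c => p c || (c == t)) (c :: d :: r) := by
                  simp only [onePassP]; rw [if_neg (by simp [hg'])]

lemma onePassP_step (p : Char → Bool) (t : Char)
    (hpt : p t = false) (hps : p ' ' = false) (s : List Char) :
    repl1 t (onePassP p s) = onePassP (fun c => p c || (c == t)) s :=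
  onePassP_step_fuel p t hpt hps s.length s le_rfl

-- A's replace on a two-character pattern "t " with replacement "t" is repl1 t
lemma replace_go_pair (t : Char) :
    ∀ (fuel : Nat) (l acc : List Char), l.length ≤ fuel →
      PySem.Chars.replace.go [t, ' '] [t] fuel l acc = acc.reverse ++ repl1 t l := by
  intro fuel
  induction fuel with
  | zero =>
    intro l acc hl
    have : l = [] := List.eq_nil_of_length_eq_zero (Nat.le_zero.mp hl)
    subst this; simp [PySem.Chars.replace.go, repl1]
  | succ n ih =>
    intro l acc hl
    cases l with
    | nil => simp [PySem.Chars.replace.go, repl1]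
    | cons c l' =>
      cases l' with
      | nil =>
        have hpre : [t, ' '].isPrefixOf [c] = false := by simp [List.isPrefixOf]
        simp only [PySem.Chars.replace.go, hpre, Bool.false_eq_true]
        rw [ih [] (c :: acc) (by simp)]
        simp [repl1]
      | cons d r =>
        simp only [List.length_cons] at hl
        by_cases h : c = t ∧ d = ' '
        · obtain ⟨hc, hd⟩ := h; subst hc; subst hd
          have hpre : [c, ' '].isPrefixOf (c :: ' ' :: r) = true := by
            simp [List.isPrefixOf]
          simp only [PySem.Chars.replace.go, hpre, if_pos]
          rw [show List.drop [c, ' '].length (c :: ' ' :: r) = r by simp]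
          rw [ih r ([c].reverse ++ acc) (by omega)]
          simp [repl1]
        · have hpre : [t, ' '].isPrefixOf (c :: d :: r) = false := by
            simp [List.isPrefixOf]
            intro hc hd
            exact absurd ⟨hc.symm, hd.symm⟩ h
          simp only [PySem.Chars.replace.go, hpre, Bool.false_eq_true]
          rw [ih (d :: r) (c :: acc) (by simp; omega),
              repl1_cons_of t c (d :: r) (by
                rcases not_and_or.mp h with h' | h'
                · exact Or.inl h'
                · right; simp [h'])]
          simp

lemma replace_pair (t : Char) (l : List Char) :
    PySem.Chars.replace l [t, ' '] [t] = repl1 t l := by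
  simp only [PySem.Chars.replace]
  rw [if_neg (by simp)]
  exact (replace_go_pair t l.length l [] (le_refl _)).trans (by simp)

-- the fourteen passes, folded over the list of trigger characters
lemma fold_repl : ∀ (ts : List Char), ts.Nodup → ' ' ∉ ts → ∀ l : List Char,
    List.foldl (fun acc t => repl1 t acc) l ts = onePassP (fun c => ts.contains c) l := by
  intro ts
  induction ts using List.reverseRecOn with
  | nil =>
    intro _ _ l
    simp only [List.foldl_nil]
    exact (onePassP_false l).symm
  | append_singleton ts t ih =>
    intro hnd hsp l
    have hnd' : ts.Nodup ∧ t ∉ ts := by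
      simp [List.nodup_append] at hnd
      exact ⟨hnd.1, fun hm => hnd.2 t hm rfl⟩
    have hsp1 : ' ' ∉ ts := fun hm => hsp (List.mem_append_left _ hm)
    rw [List.foldl_append, List.foldl_cons, List.foldl_nil, ih hnd'.1 hsp1 l,
        onePassP_step (fun c => ts.contains c) t (by simpa using hnd'.2) (by simpa using hsp1)]
    refine onePassP_congr _ _ (fun c => ?_) l
    simp
    cases hc : c == t <;> simp_all

lemma chain_eq (l : List Char) :
    repl1 ',' (repl1 '-' (repl1 '(' (repl1 '.' (repl1 '9' (repl1 '8' (repl1 '7' (repl1 '6'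
      (repl1 '5' (repl1 '4' (repl1 '3' (repl1 '2' (repl1 '1' (repl1 '0' l))))))))))))) = onePassP pvTrig l := by
  have h := fold_repl ['0','1','2','3','4','5','6','7','8','9','.','(','-',','] (by decide) (by decide) l
  simp only [List.foldl_cons, List.foldl_nil] at h
  exact h.trans (onePassP_congr _ pvTrig (fun c => rfl) l)

-- ---- B side ----

-- PySem's split on a single-space separator is the reference splitH
lemma splitOn_go_eq :
    ∀ (fuel : Nat) (l cur acc : List Char) (accs : List (List Char)), l.length < fuel →
      PySem.Chars.splitOn.go [' '] fuel l cur accs = accs.reverse ++ splitH cur.reverse l := by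
  intro fuel
  induction fuel with
  | zero => intro l cur accs h; omega
  | succ n ih =>
    intro l cur _ accs hl
    cases l with
    | nil => simp [PySem.Chars.splitOn.go, splitH]
    | cons c rest =>
      simp only [List.length_cons] at hl
      by_cases hc : c = ' '
      · subst hc
        have hpre : [' '].isPrefixOf (' ' :: rest) = true := by simp [List.isPrefixOf]
        simp only [PySem.Chars.splitOn.go, hpre, if_pos]
        rw [show List.drop [' '].length (' ' :: rest) = rest by simp]
        rw [ih rest [] [] (cur.reverse :: accs) (by omega)]
        simp [splitH]
      · have hpre : [' '].isPrefixOf (c :: rest) = false := by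
          simp [List.isPrefixOf]; exact fun h => absurd h.symm hc
        simp only [PySem.Chars.splitOn.go, hpre, Bool.false_eq_true, if_neg]
        rw [ih rest (c :: cur) [] accs (by omega)]
        simp [splitH, hc]

lemma splitOn_eq (l : List Char) :
    PySem.Chars.splitOn l [' '] = splitH [] l := by
  have := splitOn_go_eq (l.length + 1) l [] [] [] (by omega)
  simpa [PySem.Chars.splitOn] using this

lemma splitH_ne_nil (cur l : List Char) : splitH cur l ≠ [] := by
  induction l generalizing cur with
  | nil => simp [splitH]
  | cons c r ih =>
    simp only [splitH]
    split
    · simp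
    · exact ih _

lemma joinGo_eq_jAll (prev : List Char) (parts : List (List Char)) (h : parts ≠ []) :
    joinGo prev parts = (if pvEndsTrig prev then [] else [' ']) ++ jAll parts := by
  cases parts with
  | nil => exact absurd rfl h
  | cons q qs =>
    simp only [joinGo, jAll]
    split <;> simp

-- B's foldl over the consecutive pairs builds exactly joinGo
lemma fold_zip_eq (ps : List (List Char)) :
    ∀ (prev : List Char) (acc : List (List Char)),
      (((prev :: ps).zip ps).foldl
        (fun acc pp =>
          let acc := if !(pvEndsTrig pp.1) then acc ++ [[' ']] else acc
          acc ++ [pp.2]) acc).flatten = acc.flatten ++ joinGo prev ps := by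
  induction ps with
  | nil => intro prev acc; simp [joinGo]
  | cons q qs ih =>
    intro prev acc
    simp only [List.zip_cons_cons, List.foldl_cons]
    rw [ih q]
    simp only [joinGo]
    cases h : pvEndsTrig prev <;> simp [h]

-- rejoining the split of l is the flag scan of l
lemma jAll_splitH (l : List Char) :
    ∀ cur, jAll (splitH cur l) = cur ++ scanF (pvEndsTrig cur) l := by
  induction l with
  | nil => intro cur; simp [splitH, jAll, joinGo, scanF]
  | cons c r ih =>
    intro cur
    by_cases hc : c = ' '
    · subst hc
      rw [show splitH cur (' ' :: r) = cur :: splitH [] r from by simp [splitH]]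
      simp only [jAll]
      rw [joinGo_eq_jAll cur _ (splitH_ne_nil _ _), ih []]
      rw [show pvEndsTrig ([] : List Char) = false from rfl]
      simp only [scanF]
      cases h : pvEndsTrig cur
      · simp [h, show pvTrig ' ' = false from rfl]
      · simp [h]
    · rw [show splitH cur (c :: r) = splitH (cur ++ [c]) r from by simp [splitH, hc]]
      rw [ih (cur ++ [c])]
      rw [show pvEndsTrig (cur ++ [c]) = pvTrig c from by simp [pvEndsTrig]]
      simp only [scanF]
      rw [if_neg (by simp [hc])]
      simp

-- the flag scan is the pair scan
lemma scanF_eq_onePassP (l : List Char) : scanF false l = onePassP pvTrig l := by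
  induction l using onePassP.induct pvTrig with
  | case1 => rfl
  | case2 c => simp [scanF, onePassP]
  | case3 c d r hg ih =>
    obtain ⟨hc, hd⟩ := Bool.and_eq_true_iff.mp hg
    have hd' : d = ' ' := by simpa using hd
    subst hd'
    simp [scanF, onePassP, hc, ih]
  | case4 c d r hg ih =>
    have hne : (pvTrig c && (d == ' ')) = false := by simpa using hg
    have h1 : scanF false (c :: d :: r) = c :: scanF (pvTrig c) (d :: r) := by
      simp [scanF]
    have h2 : scanF (pvTrig c) (d :: r) = d :: scanF (pvTrig d) r := by
      simp only [scanF]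
      rw [if_neg (by simp [hne])]
    have h3 : scanF false (d :: r) = d :: scanF (pvTrig d) r := by simp [scanF]
    rw [h1, h2, ← h3, ih]
    simp only [onePassP]
    rw [if_neg (by simp [hne])]

lemma ports_eq (d : String) : format_decoding d = format_decoding_alt d := by
  unfold format_decoding format_decoding_alt
  rw [show PySem.List.pyRange 0 10 1 = [0,1,2,3,4,5,6,7,8,9] from by decide]
  simp only [List.foldl_cons, List.foldl_nil]
  simp only [show PySem.Int.toChars 0 = ['0'] from rfl, show PySem.Int.toChars 1 = ['1'] from rfl,
    show PySem.Int.toChars 2 = ['2'] from rfl, show PySem.Int.toChars 3 = ['3'] from rfl,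
    show PySem.Int.toChars 4 = ['4'] from rfl, show PySem.Int.toChars 5 = ['5'] from rfl,
    show PySem.Int.toChars 6 = ['6'] from rfl, show PySem.Int.toChars 7 = ['7'] from rfl,
    show PySem.Int.toChars 8 = ['8'] from rfl, show PySem.Int.toChars 9 = ['9'] from rfl]
  simp only [show ∀ t : Char, (([t] : List Char) ++ [' ']) = [t, ' '] from fun t => rfl]
  simp only [replace_pair]
  rw [chain_eq]
  -- B side: splitOn = splitH, fold = joinGo, rejoin = onePassP
  rw [splitOn_eq]
  obtain ⟨p, ps, hps⟩ : ∃ p ps, splitH [] d.toList = p :: ps := by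
    cases h : splitH [] d.toList with
    | nil => exact absurd h (splitH_ne_nil _ _)
    | cons p ps => exact ⟨p, ps, rfl⟩
  rw [hps]
  simp only [List.headD_cons, List.tail_cons]
  rw [fold_zip_eq ps p [p]]
  have : ([p] : List (List Char)).flatten ++ joinGo p ps = jAll (p :: ps) := by
    simp [jAll]
  rw [this, ← hps, jAll_splitH d.toList []]
  rw [show pvEndsTrig ([] : List Char) = false from rfl, scanF_eq_onePassP]
  simp only [PySem.Str.replace, String.toList_ofList]
  simp [PySem.Chars.replace]

-- ===== VERDICT (by name: the statement is the Claim_ definition above) =====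
theorem format_decoding_spec : Claim_equal_format_decoding := by
  intro d _
  unfold Spec_format_decoding
  exact ports_eq d
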